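-- pv_equiv track=rewrite | github.com/y-yuchien-c/f1_race_strategy_dashboard | src/strategy_analyzer.py | classify_strategies
-- ===== SOURCE A (Python) =====
-- def classify_strategies(strategies):
--     """Group drivers by number of stops"""
--     strategy_groups = {}
--     for strat in strategies:
--         stops = strat['TotalStops']
--         if stops not in strategy_groups:
--             strategy_groups[stops] = []
--         strategy_groups[stops].append(strat['Driver'])
--     return strategy_groups
-- ===== SOURCE B (Python) =====
-- def classify_strategies(strategies):
--     """Group drivers by number of stops"""
--     stops_seq = [s['TotalStops'] for s in strategies]
--     drivers = [s['Driver'] for s in strategies]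
--     result = {}
--     for k in dict.fromkeys(stops_seq):
--         result[k] = [d for st, d in zip(stops_seq, drivers) if st == k]
--     return result
-- ===== Notes on version B (the rewrite author's own statement) =====
-- stated objective: alternative
-- what changed: A builds the groups in one pass appending into a dict; B first extracts the stop counts and drivers, deduplicates the stop counts with dict.fromkeys, then builds each group by a filtering pass over the zipped columns.
import Mathlib
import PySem

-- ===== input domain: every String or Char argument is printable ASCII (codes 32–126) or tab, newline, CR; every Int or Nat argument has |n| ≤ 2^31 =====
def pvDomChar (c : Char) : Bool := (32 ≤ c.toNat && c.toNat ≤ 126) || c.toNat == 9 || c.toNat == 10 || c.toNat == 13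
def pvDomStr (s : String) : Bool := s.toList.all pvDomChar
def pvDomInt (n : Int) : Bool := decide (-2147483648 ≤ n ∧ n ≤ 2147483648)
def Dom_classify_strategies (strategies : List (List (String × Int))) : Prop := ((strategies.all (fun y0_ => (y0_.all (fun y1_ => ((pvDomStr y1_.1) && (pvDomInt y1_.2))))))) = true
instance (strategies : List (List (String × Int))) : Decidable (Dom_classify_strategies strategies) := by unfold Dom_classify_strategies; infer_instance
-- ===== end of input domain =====

-- B regroups by deduplicated stop counts with a per-key filtering pass over extracted columns, instead of A's single-pass dict appends; alternative structure, same results.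


-- ===== PORT A =====
-- strat['TotalStops'] / strat['Driver'] : first-match lookup in the association list; the .getD 0
-- arm is only reached on inputs excluded by Pre_ (missing key = KeyError in Python).
def classify_strategies (strategies : List (List (String × Int))) : List (Int × List Int) :=
  (strategies.foldl
    (fun (g : PySem.Dict Int (List Int)) strat =>
      let stops := (List.lookup "TotalStops" strat).getD 0
      let g := if g.contains stops then g else g.insert stops []
      g.modify stops [] (fun v => v ++ [(List.lookup "Driver" strat).getD 0]))
    PySem.Dict.empty).items

-- ===== PORT B =====
def classify_strategies_alt (strategies : List (List (String × Int))) : List (Int × List Int) :=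
  let stopsSeq := strategies.map (fun s => (List.lookup "TotalStops" s).getD 0)
  let drivers := strategies.map (fun s => (List.lookup "Driver" s).getD 0)
  ((PySem.List.dedup stopsSeq).foldl
    (fun (r : PySem.Dict Int (List Int)) k =>
      r.insert k (((stopsSeq.zip drivers).filter (fun p => p.1 == k)).map (·.2)))
    PySem.Dict.empty).items

-- ===== PRECONDITION & SPEC =====
-- Pre_ excludes exactly the inputs where A raises KeyError: a strategy record missing 'TotalStops' or 'Driver'.
def Pre_classify_strategies (strategies : List (List (String × Int))) : Prop :=
  ∀ s ∈ strategies, "TotalStops" ∈ s.map Prod.fst ∧ "Driver" ∈ s.map Prod.fst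
instance (strategies : List (List (String × Int))) : Decidable (Pre_classify_strategies strategies) := by unfold Pre_classify_strategies; infer_instance
def pvWitness_classify_strategies : (List (List (String × Int))) := [[("TotalStops", 1), ("Driver", 44)], [("TotalStops", 2), ("Driver", 16)], [("TotalStops", 1), ("Driver", 55)]]

def Spec_classify_strategies (strategies : List (List (String × Int))) (out : List (Int × List Int)) : Prop := out = classify_strategies_alt strategies
instance (strategies : List (List (String × Int))) (out : List (Int × List Int)) : Decidable (Spec_classify_strategies strategies out) := by unfold Spec_classify_strategies; infer_instance

-- ===== CLAIM (what is proved, stated in full; the proofs are below) =====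
def Claim_equal_classify_strategies : Prop := ∀ (strategies : List (List (String × Int))), Dom_classify_strategies strategies → Pre_classify_strategies strategies → Spec_classify_strategies strategies (classify_strategies strategies)

-- ===== LEMMAS AND PROOFS =====

-- abbreviations for strat['TotalStops'] and strat['Driver'] (proof-side only)
def pvKey (s : List (String × Int)) : Int := (List.lookup "TotalStops" s).getD 0
def pvDrv (s : List (String × Int)) : Int := (List.lookup "Driver" s).getD 0

-- A's "create-if-absent then append" step builds the same dict as a bare modify-with-default.
theorem setdefault_modify_eq_modify (d : PySem.Dict Int (List Int)) (k : Int) (f : List Int → List Int) :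
    ((if d.contains k then d else d.insert k []).modify k [] f) = d.modify k [] f := by
  by_cases h : d.contains k
  · simp [h]
  · have h' : d.contains k = false := by simpa using h
    simp only [Bool.false_eq_true, if_false, PySem.Dict.modify,
      PySem.Dict.getD_insert_self, PySem.Dict.insert_insert_self,
      PySem.Dict.getD_of_not_contains, h']

theorem classify_strategies_spec : Claim_equal_classify_strategies := by
  intro strategies _ _
  show classify_strategies strategies = classify_strategies_alt strategies
  show (strategies.foldl
      (fun (g : PySem.Dict Int (List Int)) strat =>
        let stops := pvKey strat
        let g := if g.contains stops then g else g.insert stops []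
        g.modify stops [] (fun v => v ++ [pvDrv strat]))
      PySem.Dict.empty).items
    =
    (let stopsSeq := strategies.map pvKey
     let drivers := strategies.map pvDrv
     ((PySem.List.dedup stopsSeq).foldl
       (fun (r : PySem.Dict Int (List Int)) k =>
         r.insert k (((stopsSeq.zip drivers).filter (fun p => p.1 == k)).map (·.2)))
       PySem.Dict.empty).items)
  simp only [List.zip_map']
  set l := strategies.map (fun s => (pvKey s, pvDrv s)) with hl
  have hA : (strategies.foldl
      (fun (g : PySem.Dict Int (List Int)) strat =>
        let stops := pvKey strat
        let g := if g.contains stops then g else g.insert stops []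
        g.modify stops [] (fun v => v ++ [pvDrv strat]))
      PySem.Dict.empty)
      = l.foldl (fun (g : PySem.Dict Int (List Int)) p => g.modify p.1 [] (fun v => v ++ [p.2]))
          PySem.Dict.empty := by
    rw [hl, List.foldl_map]
    exact PySem.List.foldl_congr_mem _ _ _ _ (fun g s _ => setdefault_modify_eq_modify g (pvKey s) _)
  rw [hA]
  set dA := l.foldl (fun (g : PySem.Dict Int (List Int)) p => g.modify p.1 [] (fun v => v ++ [p.2])) PySem.Dict.empty with hdA
  have hkeys : dA.keys = PySem.List.dedup (strategies.map pvKey) := by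
    rw [hdA, PySem.Dict.keys_foldl_modify_key l Prod.fst [] (fun _ p => fun v => v ++ [p.2])]
    simp only [hl, List.map_map, Function.comp_def, PySem.Dict.keys]
    rw [show (PySem.Dict.empty : PySem.Dict Int (List Int)).items.map Prod.fst = ([] : List Int) from rfl]
    rw [PySem.Set.update_nil_left, ← PySem.List.dedup_eq_ofList]
  have hnd : dA.keys.Nodup := by rw [hkeys]; exact PySem.List.nodup_dedup _
  rw [PySem.Dict.items_eq_map_keys dA hnd [], hkeys]
  rw [PySem.Dict.items_foldl_insert_fresh (PySem.List.dedup (strategies.map pvKey)) (fun a => a)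
      (fun k => ((l.filter (fun p => p.1 == k)).map (·.2))) PySem.Dict.empty
      (fun a _ => by simp [PySem.Dict.contains_empty])
      (by simp)]
  rw [show (PySem.Dict.empty : PySem.Dict Int (List Int)).items = [] from rfl, List.nil_append]
  refine List.map_congr_left (fun k hk => ?_)
  rw [hdA, PySem.Dict.getD_foldl_modify_append l PySem.Dict.empty k]
  simp
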